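-- pv_equiv track=rewrite | github.com/thevitorhideki/academia-python | for_loop/hard/maior_abobora.py | maior_abobora
-- ===== SOURCE A (Python) =====
-- def maior_abobora(specie: str, pumpkin: list) -> int:
--     index = -1
--     size = 0
--
--     for i in range(len(pumpkin)):
--         for j in pumpkin[i]:
--             if j[1] == specie and size < j[0]:
--                 index = i
--                 size = j[0]
--
--     return index
-- ===== SOURCE B (Python) =====
-- def maior_abobora(specie: str, pumpkin: list) -> int:
--     candidates = [(j[0], i)
--                   for i, row in enumerate(pumpkin)
--                   for j in row
--                   if j[1] == specie and j[0] > 0]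
--     candidates.sort(key=lambda t: (-t[0], t[1]))
--     return candidates[0][1] if candidates else -1
-- ===== Notes on version B (the rewrite author's own statement) =====
-- stated objective: alternative
-- what changed: Replaces A's nested scan with a running (index, size) accumulator by a collect-then-sort selection: flatten all positive matching pumpkins into (size, row) candidate pairs, sort them by (-size, row) and take the first pair's row (or -1 if none).
import Mathlib
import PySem

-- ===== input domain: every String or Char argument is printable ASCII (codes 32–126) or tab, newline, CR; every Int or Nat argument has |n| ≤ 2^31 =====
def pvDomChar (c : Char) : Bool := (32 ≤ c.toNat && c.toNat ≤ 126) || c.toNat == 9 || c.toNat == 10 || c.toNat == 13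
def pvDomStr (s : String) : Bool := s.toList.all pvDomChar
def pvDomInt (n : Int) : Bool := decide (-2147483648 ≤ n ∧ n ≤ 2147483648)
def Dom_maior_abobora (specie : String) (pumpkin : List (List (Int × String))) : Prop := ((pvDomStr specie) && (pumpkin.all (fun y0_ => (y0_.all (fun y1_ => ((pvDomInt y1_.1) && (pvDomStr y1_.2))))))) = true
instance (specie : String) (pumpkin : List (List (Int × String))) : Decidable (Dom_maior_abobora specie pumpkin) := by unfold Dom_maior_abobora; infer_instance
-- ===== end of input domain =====

-- B replaces A's running-accumulator nested scan by collect-then-sort selection: flatten matching positive pumpkins to (size, row) pairs, sort by (-size, row), take the first (alternative algorithm, same return value).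


-- ===== PORT A =====
-- for i in range(len(pumpkin)): for j in pumpkin[i]: …  — iterated as (index, row) pairs
def maior_abobora (specie : String) (pumpkin : List (List (Int × String))) : Int :=
  ((PySem.List.enumerate pumpkin 0).foldl
    (fun st p =>
      p.2.foldl (fun st j =>
        if j.2 == specie ∧ st.2 < j.1 then (p.1, j.1) else st) st)
    (-1, 0)).1

-- ===== PORT B =====
-- candidates = [(j[0], i) for i, row in enumerate(pumpkin) for j in row if j[1] == specie and j[0] > 0]
def pvCands (specie : String) (pumpkin : List (List (Int × String))) : List (Int × Int) :=
  (PySem.List.enumerate pumpkin 0).flatMap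
    (fun p => (p.2.filter (fun j => j.2 == specie && decide (0 < j.1))).map (fun j => (j.1, p.1)))

-- candidates.sort(key=lambda t: (-t[0], t[1])); return candidates[0][1] if candidates else -1
def maior_abobora_alt (specie : String) (pumpkin : List (List (Int × String))) : Int :=
  match PySem.List.sorted2 (pvCands specie pumpkin) (fun t => -t.1) (fun t => t.2) with
  | [] => -1
  | t :: _ => t.2

-- ===== PRECONDITION & SPEC =====
def Spec_maior_abobora (specie : String) (pumpkin : List (List (Int × String))) (out : Int) : Prop := out = maior_abobora_alt specie pumpkin
instance (specie : String) (pumpkin : List (List (Int × String))) (out : Int) : Decidable (Spec_maior_abobora specie pumpkin out) := by unfold Spec_maior_abobora; infer_instance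

-- ===== CLAIM (what is proved, stated in full; the proofs are below) =====
def Claim_equal_maior_abobora : Prop := ∀ (specie : String) (pumpkin : List (List (Int × String))), Dom_maior_abobora specie pumpkin → Spec_maior_abobora specie pumpkin (maior_abobora specie pumpkin)

-- ===== LEMMAS AND PROOFS =====

-- A's update read on the flattened candidate stream; state = (index, size), candidate = (size, index).
def pvStep (st c : Int × Int) : Int × Int := if st.2 < c.1 then (c.2, c.1) else st

-- sorted2's comparison for keys k1 = (-·.1), k2 = (·.2)
def pvBefore (a b : Int × Int) : Bool :=
  decide ((-a.1) < (-b.1)) || (!decide ((-b.1) < (-a.1)) && decide (a.2 < b.2))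

-- 'a strictly beats b': bigger size, or equal size and earlier row
def pvKlt (a b : Int × Int) : Prop := b.1 < a.1 ∨ (a.1 = b.1 ∧ a.2 < b.2)

-- candidate stream of the rows enumerated from n
def pvCandsFrom (specie : String) (rows : List (List (Int × String))) (n : Int) : List (Int × Int) :=
  (PySem.List.enumerate rows n).flatMap
    (fun p => (p.2.filter (fun j => j.2 == specie && decide (0 < j.1))).map (fun j => (j.1, p.1)))

theorem pvCands_eq (specie : String) (pumpkin : List (List (Int × String))) :
    pvCands specie pumpkin = pvCandsFrom specie pumpkin 0 := rfl

theorem pvCandsFrom_cons (specie : String) (r : List (Int × String)) (rs : List (List (Int × String))) (n : Int) :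
    pvCandsFrom specie (r :: rs) n
      = (r.filter (fun j => j.2 == specie && decide (0 < j.1))).map (fun j => (j.1, n))
        ++ pvCandsFrom specie rs (n + 1) := by
  simp [pvCandsFrom, PySem.List.enumerate_cons]

theorem pv_cands_pos (specie : String) (rows : List (List (Int × String))) (n : Int) :
    ∀ c ∈ pvCandsFrom specie rows n, 0 < c.1 := by
  induction rows generalizing n with
  | nil => intro c hc; simp [pvCandsFrom] at hc
  | cons r rs ih =>
    intro c hc
    rw [pvCandsFrom_cons] at hc
    rcases List.mem_append.mp hc with h | h
    · obtain ⟨j, hj, rfl⟩ := List.mem_map.mp h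
      have := List.of_mem_filter hj
      simp at this
      exact this.2
    · exact ih (n + 1) c h

theorem pv_cands_idx (specie : String) (rows : List (List (Int × String))) (n : Int) :
    ∀ c ∈ pvCandsFrom specie rows n, n ≤ c.2 := by
  induction rows generalizing n with
  | nil => intro c hc; simp [pvCandsFrom] at hc
  | cons r rs ih =>
    intro c hc
    rw [pvCandsFrom_cons] at hc
    rcases List.mem_append.mp hc with h | h
    · obtain ⟨j, _, rfl⟩ := List.mem_map.mp h; exact le_refl n
    · exact le_trans (by omega) (ih (n + 1) c h)

theorem pv_cands_pairwise (specie : String) (rows : List (List (Int × String))) (n : Int) :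
    List.Pairwise (fun a b : Int × Int => a.2 ≤ b.2) (pvCandsFrom specie rows n) := by
  induction rows generalizing n with
  | nil => simp [pvCandsFrom]
  | cons r rs ih =>
    rw [pvCandsFrom_cons]
    apply List.pairwise_append.mpr
    refine ⟨?_, ih (n + 1), ?_⟩
    · apply List.pairwise_map.mpr
      exact List.pairwise_of_forall (fun _ _ => le_refl n)
    · intro a ha b hb
      obtain ⟨j, _, rfl⟩ := List.mem_map.mp ha
      have := pv_cands_idx specie rs (n + 1) b hb
      omega

theorem pv_step_snd_mono (l : List (Int × Int)) (idx s : Int) :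
    s ≤ (l.foldl pvStep (idx, s)).2 := by
  induction l generalizing idx s with
  | nil => exact le_rfl
  | cons c t ih =>
    simp only [List.foldl_cons, pvStep]
    split_ifs with h
    · exact le_trans (le_of_lt h) (ih c.2 c.1)
    · exact ih idx s

-- A's inner row loop is the pvStep fold over the row's positive matching candidates
theorem pv_inner (specie : String) (row : List (Int × String)) (i idx s : Int) (hs : 0 ≤ s) :
    row.foldl (fun st j => if j.2 == specie ∧ st.2 < j.1 then (i, j.1) else st) (idx, s)
    = ((row.filter (fun j => j.2 == specie && decide (0 < j.1))).map (fun j => (j.1, i))).foldl pvStep (idx, s) := by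
  induction row generalizing idx s with
  | nil => rfl
  | cons j t ih =>
    simp only [List.foldl_cons, List.filter_cons]
    by_cases hm : (j.2 == specie) = true
    · by_cases hp : 0 < j.1
      · rw [show (j.2 == specie && decide (0 < j.1)) = true by simp [hm, hp]]
        simp only [if_true, List.map_cons, List.foldl_cons]
        by_cases hlt : s < j.1
        · rw [if_pos ⟨hm, hlt⟩, show pvStep (idx, s) (j.1, i) = (i, j.1) from by simp [pvStep, hlt]]
          exact ih i j.1 (by omega)
        · rw [if_neg (fun h => hlt h.2), show pvStep (idx, s) (j.1, i) = (idx, s) from by simp [pvStep, hlt]]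
          exact ih idx s hs
      · rw [if_neg (fun h => absurd h.2 (by omega)),
          show (j.2 == specie && decide (0 < j.1)) = false by simp [hp]]
        simp only [Bool.false_eq_true, if_false]
        exact ih idx s hs
    · rw [if_neg (fun h => hm h.1),
        show (j.2 == specie && decide (0 < j.1)) = false by simp [hm]]
      simp only [Bool.false_eq_true, if_false]
      exact ih idx s hs

-- A's whole nested loop is the pvStep fold over the flattened candidate stream
theorem pv_flatten (specie : String) (rows : List (List (Int × String))) (n idx s : Int) (hs : 0 ≤ s) :
    (PySem.List.enumerate rows n).foldl
      (fun st p =>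
        p.2.foldl (fun st j =>
          if j.2 == specie ∧ st.2 < j.1 then (p.1, j.1) else st) st)
      (idx, s)
    = (pvCandsFrom specie rows n).foldl pvStep (idx, s) := by
  induction rows generalizing n idx s with
  | nil => rfl
  | cons r rs ih =>
    rw [PySem.List.enumerate_cons, List.foldl_cons, pvCandsFrom_cons, List.foldl_append,
      pv_inner specie r n idx s hs]
    have h2 := pv_step_snd_mono ((r.filter (fun j => j.2 == specie && decide (0 < j.1))).map (fun j => (j.1, n))) idx s
    set st' := ((r.filter (fun j => j.2 == specie && decide (0 < j.1))).map (fun j => (j.1, n))).foldl pvStep (idx, s) with hst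
    have := ih (n + 1) st'.1 st'.2 (by omega)
    simpa using this

-- the fold selects the first candidate of maximal size (strictly beating all others), if any candidate is positive
theorem pv_best (cs : List (Int × Int)) : ∀ (idx s : Int),
    (∀ c ∈ cs, 0 < c.1) → List.Pairwise (fun a b : Int × Int => a.2 ≤ b.2) cs →
    (cs.foldl pvStep (idx, s) = (idx, s) ∧ ∀ c ∈ cs, c.1 ≤ s)
    ∨ ∃ b : Int × Int, cs.foldl pvStep (idx, s) = (b.2, b.1) ∧ b ∈ cs ∧ s < b.1 ∧
        ∀ c ∈ cs, c = b ∨ pvKlt b c ∨ c.1 ≤ s := by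
  induction cs with
  | nil => intro idx s _ _; exact Or.inl ⟨rfl, by simp⟩
  | cons c t ih =>
    intro idx s hpos hpw
    have hpw' := List.pairwise_cons.mp hpw
    simp only [List.foldl_cons, pvStep]
    by_cases hlt : s < c.1
    · rw [if_pos hlt]
      rcases ih c.2 c.1 (fun x hx => hpos x (List.mem_cons_of_mem _ hx)) hpw'.2 with ⟨heq, hall⟩ | ⟨b, heq, hmem, hsb, hbest⟩
      · refine Or.inr ⟨c, heq, List.mem_cons_self .., hlt, ?_⟩
        intro x hx
        rcases List.mem_cons.mp hx with rfl | hx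
        · exact Or.inl rfl
        · have h1 := hall x hx
          have h2 := hpw'.1 x hx
          by_cases he : x.1 = c.1
          · by_cases he2 : x.2 = c.2
            · exact Or.inl (Prod.ext he he2)
            · exact Or.inr (Or.inl (Or.inr ⟨he.symm, by omega⟩))
          · exact Or.inr (Or.inl (Or.inl (by omega)))
      · refine Or.inr ⟨b, heq, List.mem_cons_of_mem _ hmem, by omega, ?_⟩
        intro x hx
        rcases List.mem_cons.mp hx with rfl | hx
        · exact Or.inr (Or.inl (Or.inl (by omega)))
        · rcases hbest x hx with h | h | h
          · exact Or.inl h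
          · exact Or.inr (Or.inl h)
          · exact Or.inr (Or.inl (Or.inl (by omega)))
    · rw [if_neg hlt]
      rcases ih idx s (fun x hx => hpos x (List.mem_cons_of_mem _ hx)) hpw'.2 with ⟨heq, hall⟩ | ⟨b, heq, hmem, hsb, hbest⟩
      · refine Or.inl ⟨heq, ?_⟩
        intro x hx
        rcases List.mem_cons.mp hx with rfl | hx
        · omega
        · exact hall x hx
      · refine Or.inr ⟨b, heq, List.mem_cons_of_mem _ hmem, hsb, ?_⟩
        intro x hx
        rcases List.mem_cons.mp hx with rfl | hx
        · exact Or.inr (Or.inr (by omega))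
        · exact hbest x hx

theorem pvBefore_irrefl (a : Int × Int) : pvBefore a a = false := by
  simp [pvBefore]

theorem pvBefore_of_klt {b c : Int × Int} (h : pvKlt b c) :
    pvBefore b c = true ∧ pvBefore c b = false := by
  rcases h with h | ⟨h1, h2⟩ <;> constructor <;> simp [pvBefore] <;> omega

theorem pv_insert_keep (x r : Int × Int) (hx : pvBefore x r = false) (acc : List (Int × Int))
    (h : acc.head? = some r) :
    (PySem.List.insertBy pvBefore x acc).head? = some r := by
  cases acc with
  | nil => simp at h
  | cons a t =>
    have : a = r := by simpa using h
    subst this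
    simp [PySem.List.insertBy, hx]

theorem pv_insert_front (r : Int × Int) (acc : List (Int × Int))
    (h : ∀ a ∈ acc, pvBefore r a = true) :
    (PySem.List.insertBy pvBefore r acc).head? = some r := by
  cases acc with
  | nil => simp [PySem.List.insertBy]
  | cons a t => simp [PySem.List.insertBy, h a (List.mem_cons_self ..)]

theorem pv_fold_after (l : List (Int × Int)) (r : Int × Int) :
    ∀ acc : List (Int × Int), (∀ x ∈ l, pvBefore x r = false) → acc.head? = some r →
    (l.foldl (fun acc x => PySem.List.insertBy pvBefore x acc) acc).head? = some r := by
  induction l with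
  | nil => intro acc _ h; exact h
  | cons x t ih =>
    intro acc hl h
    exact ih _ (fun y hy => hl y (List.mem_cons_of_mem _ hy))
      (pv_insert_keep x r (hl x (List.mem_cons_self ..)) acc h)

theorem pv_fold_before (l : List (Int × Int)) (r : Int × Int) :
    ∀ acc : List (Int × Int), r ∈ l →
    (∀ x ∈ l, x = r ∨ (pvBefore r x = true ∧ pvBefore x r = false)) →
    (∀ a ∈ acc, pvBefore r a = true) →
    (l.foldl (fun acc x => PySem.List.insertBy pvBefore x acc) acc).head? = some r := by
  induction l with
  | nil => intro acc hr _ _; cases hr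
  | cons x t ih =>
    intro acc hr hl hacc
    rw [List.foldl_cons]
    have htail : ∀ y ∈ t, y = r ∨ (pvBefore r y = true ∧ pvBefore y r = false) :=
      fun y hy => hl y (List.mem_cons_of_mem _ hy)
    rcases hl x (List.mem_cons_self ..) with rfl | hx
    · -- x = r: it goes to the front and stays there
      refine pv_fold_after t x _ ?_ (pv_insert_front x acc hacc)
      intro y hy
      rcases htail y hy with rfl | hy'
      · exact pvBefore_irrefl y
      · exact hy'.2
    · -- x ≠ r: r is still ahead in t
      have hxr : x ≠ r := by
        intro h; subst h; rw [pvBefore_irrefl] at hx; exact Bool.false_ne_true hx.1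
      have hr' : r ∈ t := by
        rcases List.mem_cons.mp hr with h | h
        · exact absurd h.symm hxr
        · exact h
      refine ih _ hr' htail ?_
      intro a ha
      rcases (PySem.List.mem_insertBy pvBefore x a acc).mp ha with rfl | ha'
      · exact hx.1
      · exact hacc a ha'

theorem pv_sorted2_eq (cs : List (Int × Int)) :
    PySem.List.sorted2 cs (fun t => -t.1) (fun t => t.2) false
      = cs.foldl (fun acc x => PySem.List.insertBy pvBefore x acc) [] := rfl

-- ===== VERDICT (by name: the statement is the Claim_ definition above) =====
theorem maior_abobora_spec : Claim_equal_maior_abobora := by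
  intro specie pumpkin _
  unfold Spec_maior_abobora maior_abobora maior_abobora_alt
  rw [pv_flatten specie pumpkin 0 (-1) 0 le_rfl, pvCands_eq, pv_sorted2_eq]
  have hpos := pv_cands_pos specie pumpkin 0
  have hpw := pv_cands_pairwise specie pumpkin 0
  generalize hg : pvCandsFrom specie pumpkin 0 = cs at hpos hpw ⊢
  rcases pv_best cs (-1) 0 hpos hpw with ⟨heq, hall⟩ | ⟨b, heq, hmem, hsb, hbest⟩
  · cases cs with
    | nil => rfl
    | cons c t =>
      exfalso
      have h1 := hpos c (List.mem_cons_self ..)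
      have h2 := hall c (List.mem_cons_self ..)
      omega
  · have hhead : (cs.foldl (fun acc x => PySem.List.insertBy pvBefore x acc) []).head? = some b := by
      refine pv_fold_before cs b [] hmem ?_ (by simp)
      intro x hx
      rcases hbest x hx with h | h | h
      · exact Or.inl h
      · exact Or.inr (pvBefore_of_klt h)
      · exact absurd (hpos x hx) (by omega)
    rw [heq]
    cases hlist : cs.foldl (fun acc x => PySem.List.insertBy pvBefore x acc) [] with
    | nil => rw [hlist] at hhead; simp at hhead
    | cons h t =>
      rw [hlist] at hhead
      simp at hhead
      simp [hhead]
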